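-- pv_equiv track=rewrite | github.com/eclipse-oniro-mirrors/arkcompiler_runtime_core | static_core/docs/review/scripts/linter_report.py | make_table_data
-- ===== SOURCE A (Python) =====
-- def make_table_data(by_key, key_total, rules, label="Directory"):
--     header = [label, "Total"] + rules
--     rows = [header]
--     for k, total in sorted(key_total.items(), key=lambda x: -x[1]):
--         row = [k, str(total)] + [str(by_key[k].get(r, "")) for r in rules]
--         rows.append(row)
--     totals = ["TOTAL", str(sum(key_total.values()))]
--     totals += [str(sum(by_key[k].get(r, 0) for k in key_total)) for r in rules]
--     rows.append(totals)
--     return rows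
-- ===== SOURCE B (Python) =====
-- def make_table_data(by_key, key_total, rules, label="Directory"):
--     rows = [[label, "Total"] + rules]
--     grand = 0
--     col = [0] * len(rules)
--     for k, total in sorted(key_total.items(), key=lambda x: -x[1]):
--         row = [k, str(total)]
--         for i, r in enumerate(rules):
--             v = by_key[k].get(r)
--             if v is None:
--                 row.append("")
--             else:
--                 row.append(str(v))
--                 col[i] += v
--         rows.append(row)
--         grand += total
--     rows.append(["TOTAL", str(grand)] + [str(c) for c in col])
--     return rows
-- ===== Notes on version B (the rewrite author's own statement) =====
-- stated objective: alternative
-- what changed: B fuses A's two passes - the sorted row-building loop and the separate per-rule column re-sum comprehensions - into one pass that carries running accumulators (grand total and a parallel list of column sums) while emitting each row.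
import Mathlib
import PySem

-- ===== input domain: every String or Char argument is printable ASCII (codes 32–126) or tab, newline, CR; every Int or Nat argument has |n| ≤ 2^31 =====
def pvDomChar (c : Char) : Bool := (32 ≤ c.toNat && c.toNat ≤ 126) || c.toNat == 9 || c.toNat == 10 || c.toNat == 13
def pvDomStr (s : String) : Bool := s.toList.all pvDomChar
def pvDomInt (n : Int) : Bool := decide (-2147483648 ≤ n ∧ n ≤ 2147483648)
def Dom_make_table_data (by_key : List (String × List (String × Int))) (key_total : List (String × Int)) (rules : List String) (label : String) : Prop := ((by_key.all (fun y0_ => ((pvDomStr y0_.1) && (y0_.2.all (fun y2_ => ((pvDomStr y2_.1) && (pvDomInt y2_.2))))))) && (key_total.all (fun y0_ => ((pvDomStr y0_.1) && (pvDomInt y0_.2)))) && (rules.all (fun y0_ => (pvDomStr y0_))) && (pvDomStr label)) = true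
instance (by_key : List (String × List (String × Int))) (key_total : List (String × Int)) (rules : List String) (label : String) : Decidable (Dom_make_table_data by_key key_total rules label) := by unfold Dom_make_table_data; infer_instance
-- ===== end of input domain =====

-- B fuses A's row-building loop with the per-rule column re-sums into one pass carrying
-- running accumulators (objective: alternative decomposition — single pass, same asymptotics).

-- shared input decoding: the Python tester passes dicts; dict(pairs) semantics
def pvCellStr : Option Int → String
  | some v => PySem.Int.toStr v
  | none => ""

def pvBK (by_key : List (String × List (String × Int))) : PySem.Dict String (PySem.Dict String Int) :=
  PySem.Dict.ofList (by_key.map (fun p => (p.1, PySem.Dict.ofList p.2)))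

-- ===== PORT A =====
def make_table_data (by_key : List (String × List (String × Int))) (key_total : List (String × Int)) (rules : List String) (label : String) : List (List String) :=
  let bk := pvBK by_key
  let kt := PySem.Dict.ofList key_total
  let header := label :: "Total" :: rules
  let rows := (PySem.List.sorted kt.items (fun x => -x.2) false).foldl
      (fun acc p => acc ++ [p.1 :: PySem.Int.toStr p.2 ::
        rules.map (fun r => pvCellStr ((bk.getD p.1 PySem.Dict.empty).get? r))]) [header]
  let totals := "TOTAL" :: PySem.Int.toStr kt.values.sum ::
      rules.map (fun r => PySem.Int.toStr ((kt.keys.map (fun k => (bk.getD k PySem.Dict.empty).getD r 0)).sum))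
  rows ++ [totals]

-- ===== PORT B =====
-- B's inner loop over rules: look up by_key[k].get(r) per rule (as Source B does),
-- build the display cells and update the column accumulators in lockstep
def pvGo (bk : PySem.Dict String (PySem.Dict String Int)) (k : String) : List String → List Int → List String × List Int
  | [], _ => ([], [])
  | _ :: _, [] => ([], [])
  | r :: rs, c :: cs =>
      let v := (bk.getD k PySem.Dict.empty).get? r
      let p := pvGo bk k rs cs
      (pvCellStr v :: p.1, (c + v.getD 0) :: p.2)

def make_table_data_alt (by_key : List (String × List (String × Int))) (key_total : List (String × Int)) (rules : List String) (label : String) : List (List String) :=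
  let bk := pvBK by_key
  let kt := PySem.Dict.ofList key_total
  let st := (PySem.List.sorted kt.items (fun x => -x.2) false).foldl
      (fun st p =>
        let rc := pvGo bk p.1 rules st.2.2
        (st.1 ++ [p.1 :: PySem.Int.toStr p.2 :: rc.1], st.2.1 + p.2, rc.2))
      (([label :: "Total" :: rules] : List (List String)), (0 : Int), List.replicate rules.length (0 : Int))
  st.1 ++ [("TOTAL" :: PySem.Int.toStr st.2.1 :: st.2.2.map PySem.Int.toStr)]

-- ===== PRECONDITION & SPEC =====
-- Pre_ excludes exactly the inputs on which the Python A raises KeyError: rules nonempty and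
-- some key of key_total missing from by_key (with rules = [] the by_key[k] lookup is never
-- evaluated and A returns; B's lazy per-rule lookup behaves the same there).
def Pre_make_table_data (by_key : List (String × List (String × Int))) (key_total : List (String × Int)) (rules : List String) (label : String) : Prop :=
  rules = [] ∨ ∀ p ∈ key_total, ∃ q ∈ by_key, q.1 = p.1
instance (by_key : List (String × List (String × Int))) (key_total : List (String × Int)) (rules : List String) (label : String) : Decidable (Pre_make_table_data by_key key_total rules label) := by unfold Pre_make_table_data; infer_instance

def pvWitness_make_table_data : (List (String × List (String × Int))) × (List (String × Int)) × List String × String :=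
  ([("a", [("r", 1)]), ("b", [])], [("a", 2), ("b", 1)], ["r"], "Dir")

def Spec_make_table_data (by_key : List (String × List (String × Int))) (key_total : List (String × Int)) (rules : List String) (label : String) (out : List (List String)) : Prop := out = make_table_data_alt by_key key_total rules label
instance (by_key : List (String × List (String × Int))) (key_total : List (String × Int)) (rules : List String) (label : String) (out : List (List String)) : Decidable (Spec_make_table_data by_key key_total rules label out) := by unfold Spec_make_table_data; infer_instance

-- ===== CLAIM (what is proved, stated in full; the proofs are below) =====
def Claim_equal_make_table_data : Prop := ∀ (by_key : List (String × List (String × Int))) (key_total : List (String × Int)) (rules : List String) (label : String), Dom_make_table_data by_key key_total rules label → Pre_make_table_data by_key key_total rules label → Spec_make_table_data by_key key_total rules label (make_table_data by_key key_total rules label)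

-- ===== LEMMAS AND PROOFS =====

theorem pvGo_eq (bk : PySem.Dict String (PySem.Dict String Int)) (k : String) (rules : List String) (col : List Int)
    (h : col.length = rules.length) :
    pvGo bk k rules col =
      (rules.map (fun r => pvCellStr ((bk.getD k PySem.Dict.empty).get? r)),
       List.zipWith (fun c r => c + ((bk.getD k PySem.Dict.empty).get? r).getD 0) col rules) := by
  induction rules generalizing col with
  | nil => cases col <;> simp [pvGo] at h ⊢
  | cons r rs ih =>
      cases col with
      | nil => simp at h
      | cons c cs =>
        simp only [List.length_cons, Nat.succ.injEq] at h
        simp [pvGo, ih cs h]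

theorem zipWith_zipWith_right {α β γ δ : Type} (f : γ → β → δ) (h : α → β → γ)
    (col : List α) (rules : List β) :
    List.zipWith f (List.zipWith h col rules) rules
      = List.zipWith (fun c r => f (h c r) r) col rules := by
  induction rules generalizing col with
  | nil => simp
  | cons r rs ih => cases col <;> simp [ih]

theorem zipWith_ext {α β γ : Type} (f g : α → β → γ) (l1 : List α) (l2 : List β)
    (h : ∀ a b, f a b = g a b) : List.zipWith f l1 l2 = List.zipWith g l1 l2 := by
  induction l2 generalizing l1 with
  | nil => simp
  | cons b bs ih => cases l1 <;> simp [h, ih]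

theorem zipWith_fst {α β : Type} (col : List α) (rules : List β)
    (h : col.length = rules.length) : List.zipWith (fun c (_ : β) => c) col rules = col := by
  induction rules generalizing col with
  | nil => cases col <;> simp_all
  | cons r rs ih =>
      cases col with
      | nil => simp at h
      | cons c cs =>
        simp only [List.length_cons, Nat.succ.injEq] at h
        simp [ih cs h]

theorem zipWith_replicate_S {β : Type} (S : β → Int) (rules : List β) (n : Nat)
    (h : n = rules.length) :
    List.zipWith (fun c r => c + S r) (List.replicate n (0 : Int)) rules = rules.map S := by
  induction rules generalizing n with
  | nil => simp
  | cons r rs ih =>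
      cases n with
      | zero => simp at h
      | succ m =>
        simp only [List.length_cons, Nat.succ.injEq] at h
        simp [List.replicate_succ, ih m h]

-- the fused fold, unrolled: rows, grand total and column sums after a whole list of items
theorem alt_fold_eq (bk : PySem.Dict String (PySem.Dict String Int)) (rules : List String)
    (l : List (String × Int)) (rows : List (List String)) (g : Int) (col : List Int)
    (h : col.length = rules.length) :
    l.foldl (fun st p =>
        let rc := pvGo bk p.1 rules st.2.2
        (st.1 ++ [p.1 :: PySem.Int.toStr p.2 :: rc.1], st.2.1 + p.2, rc.2)) (rows, g, col)
      = (rows ++ l.map (fun p => p.1 :: PySem.Int.toStr p.2 ::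
            rules.map (fun r => pvCellStr ((bk.getD p.1 PySem.Dict.empty).get? r))),
         g + (l.map (fun p => p.2)).sum,
         List.zipWith (fun c r => c + (l.map (fun p => ((bk.getD p.1 PySem.Dict.empty).get? r).getD 0)).sum) col rules) := by
  induction l generalizing rows g col with
  | nil =>
      simp only [List.foldl_nil, List.map_nil, List.sum_nil, List.append_nil, add_zero]
      rw [zipWith_fst col rules h]
  | cons p l ih =>
      simp only [List.foldl_cons]
      rw [pvGo_eq _ _ _ _ h, ih _ _ _ (by simp [h])]
      refine Prod.ext ?_ (Prod.ext ?_ ?_)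
      · simp [List.append_assoc]
      · simp only [List.map_cons, List.sum_cons]; ring
      · rw [zipWith_zipWith_right]
        exact zipWith_ext _ _ _ _ (fun c r => by simp [add_assoc])

theorem make_table_data_spec : Claim_equal_make_table_data := by
  intro by_key key_total rules label _ _
  unfold Spec_make_table_data make_table_data make_table_data_alt
  dsimp only
  rw [PySem.List.foldl_append_singleton_eq_map]
  rw [alt_fold_eq _ _ _ _ _ _ (by simp)]
  rw [zipWith_replicate_S _ _ _ rfl]
  have hperm : (PySem.List.sorted (PySem.Dict.ofList key_total).items (fun x => -x.2) false).Perm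
      (PySem.Dict.ofList key_total).items := PySem.List.sorted_perm _ _ _
  have hsum : (((PySem.List.sorted (PySem.Dict.ofList key_total).items (fun x => -x.2) false).map
      (fun p => p.2)).sum) = (PySem.Dict.ofList key_total).values.sum := by
    rw [(hperm.map (fun p : String × Int => p.2)).sum_eq]; rfl
  have hcol : ∀ r : String,
      (((PySem.List.sorted (PySem.Dict.ofList key_total).items (fun x => -x.2) false).map
        (fun p => (((pvBK by_key).getD p.1 PySem.Dict.empty).get? r).getD 0)).sum)
      = (((PySem.Dict.ofList key_total).keys.map
          (fun k => ((pvBK by_key).getD k PySem.Dict.empty).getD r 0)).sum) := by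
    intro r
    rw [(hperm.map (fun p : String × Int => (((pvBK by_key).getD p.1 PySem.Dict.empty).get? r).getD 0)).sum_eq]
    have : (PySem.Dict.ofList key_total).keys = (PySem.Dict.ofList key_total).items.map (fun p => p.1) := rfl
    rw [this, List.map_map]
    congr 1
  have hmaps : List.map (fun r => PySem.Int.toStr ((List.map (fun k => ((pvBK by_key).getD k PySem.Dict.empty).getD r 0) (PySem.Dict.ofList key_total).keys).sum)) rules
      = List.map PySem.Int.toStr (List.map (fun r => (List.map (fun p => (((pvBK by_key).getD p.1 PySem.Dict.empty).get? r).getD 0) (PySem.List.sorted (PySem.Dict.ofList key_total).items (fun x => -x.2) false)).sum) rules) := by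
    rw [List.map_map]
    congr 1
    funext r
    simp only [Function.comp]
    rw [hcol r]
  simp only [zero_add, hsum, List.append_assoc, hmaps]
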